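-- pv_equiv track=rewrite | github.com/PanzhenZhao/PRISM-UNet | PRISM-UNet/PRISM/SSRB_Module.py | radial_uv
-- ===== SOURCE A (Python) =====
-- def radial_uv(dct_h: int, dct_w: int, band: str, k: int, exclude_dc: bool = True):
--     """
--     Simple radial band selection in frequency plane (u,v).
--     radius = u^2 + v^2
--     exclude_dc: if True, low-band will NOT include (0,0), avoiding gate dominated by DC/mean.
--     """
--     uv = [(u, v) for u in range(dct_h) for v in range(dct_w)]
--     uv.sort(key=lambda t: (t[0] ** 2 + t[1] ** 2))
--
--     if exclude_dc and band == "low":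
--         uv = [(u, v) for (u, v) in uv if not (u == 0 and v == 0)]
--         if len(uv) == 0:
--             uv = [(0, 0)]
--
--     k = max(1, min(int(k), len(uv)))
--
--     if band == "low":
--         sel = uv[:k]
--     elif band == "high":
--         sel = uv[-k:]
--     else:  # mid
--         mid = len(uv) // 2
--         half = k // 2
--         start = max(0, min(len(uv) - k, mid - half))
--         sel = uv[start:start + k]
--     return sel
-- ===== SOURCE B (Python) =====
-- def radial_uv(dct_h: int, dct_w: int, band: str, k: int, exclude_dc: bool = True):
--     # Group the (u,v) grid by radius with one dict pass, then flatten the groups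
--     # over the sorted distinct radii (insertion order inside a group is u-major,
--     # so this reproduces the stable radius sort), and cut one uniform window.
--     groups = {}
--     for u in range(dct_h):
--         sd = groups.setdefault
--         uu = u * u
--         for v in range(dct_w):
--             sd(uu + v * v, []).append((u, v))
--     uv = [t for r in sorted(groups) for t in groups[r]]
--
--     if exclude_dc and band == "low":
--         uv = [t for t in uv if t != (0, 0)] or [(0, 0)]
--
--     n = len(uv)
--     kk = max(1, min(int(k), n))
--     if band == "high":
--         start = n - kk
--     elif band == "low":
--         start = 0
--     else:  # mid
--         start = max(0, min(n - kk, n // 2 - kk // 2))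
--     return uv[start:start + kk]
-- ===== Notes on version B (the rewrite author's own statement) =====
-- stated objective: alternative
-- what changed: Replaces A's build-all-pairs-then-stable-sort-by-radius with a single group-by-radius dict pass flattened over the sorted distinct radii (insertion order inside a bucket reproduces the stable tie-break), and replaces A's three slicing branches by one uniform [start:start+k) window whose start is computed per band.
import Mathlib
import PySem

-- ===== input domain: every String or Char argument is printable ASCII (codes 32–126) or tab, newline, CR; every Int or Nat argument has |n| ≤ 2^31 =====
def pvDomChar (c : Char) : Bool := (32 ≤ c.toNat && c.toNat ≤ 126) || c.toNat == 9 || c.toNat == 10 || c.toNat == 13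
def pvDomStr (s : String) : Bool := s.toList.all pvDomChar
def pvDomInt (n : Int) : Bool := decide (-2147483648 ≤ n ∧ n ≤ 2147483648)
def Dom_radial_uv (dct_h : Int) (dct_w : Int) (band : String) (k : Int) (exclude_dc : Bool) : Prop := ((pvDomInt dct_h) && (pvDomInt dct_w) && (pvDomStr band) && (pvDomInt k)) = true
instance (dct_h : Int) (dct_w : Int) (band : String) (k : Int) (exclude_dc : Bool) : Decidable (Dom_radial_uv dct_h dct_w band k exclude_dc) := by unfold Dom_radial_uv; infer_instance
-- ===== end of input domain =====

-- B replaces A's stable sort of the whole grid by a one-pass group-by-radius dict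
-- flattened over its sorted distinct radii, and cuts one uniform [start:start+k)
-- window instead of three slicing branches (objective: alternative, same result).

-- ===== PORT A =====
def radial_uv (dct_h : Int) (dct_w : Int) (band : String) (k : Int) (exclude_dc : Bool) : List (Int × Int) :=
  let uv0 : List (Int × Int) :=
    (PySem.List.pyRange 0 dct_h 1).flatMap (fun u =>
      (PySem.List.pyRange 0 dct_w 1).map (fun v => (u, v)))
  let uv1 := PySem.List.sorted uv0 (fun t => t.1 ^ 2 + t.2 ^ 2) false
  let uv2 :=
    if exclude_dc && (band == "low") then
      let f := uv1.filter (fun t => !(t.1 == 0 && t.2 == 0))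
      if PySem.List.len f = 0 then [((0 : Int), (0 : Int))] else f
    else uv1
  let kk : Int := max 1 (min k (PySem.List.len uv2))
  if band == "low" then PySem.List.slice uv2 none (some kk)
  else if band == "high" then PySem.List.slice uv2 (some (-kk)) none
  else
    let mid := PySem.Int.floordiv (PySem.List.len uv2) 2
    let half := PySem.Int.floordiv kk 2
    let start := max 0 (min (PySem.List.len uv2 - kk) (mid - half))
    PySem.List.slice uv2 (some start) (some (start + kk))

-- ===== PORT B =====
def radial_uv_alt (dct_h : Int) (dct_w : Int) (band : String) (k : Int) (exclude_dc : Bool) : List (Int × Int) :=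
  -- groups.setdefault(uu + v*v, []).append((u, v)) is exactly Dict.modify (uu + v*v) [] (· ++ [(u, v)])
  let groups : PySem.Dict Int (List (Int × Int)) :=
    (PySem.List.pyRange 0 dct_h 1).foldl (fun d u =>
      let uu := u * u
      (PySem.List.pyRange 0 dct_w 1).foldl
        (fun d v => d.modify (uu + v * v) [] (fun l => l ++ [(u, v)])) d)
      PySem.Dict.empty
  let uv0 := (PySem.List.sorted groups.keys (fun r => r) false).flatMap (fun r => groups.getD r [])
  let uv :=
    if exclude_dc && (band == "low") then
      let f := uv0.filter (fun t => !(t == ((0 : Int), (0 : Int))))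
      if f = [] then [((0 : Int), (0 : Int))] else f
    else uv0
  let n := PySem.List.len uv
  let kk : Int := max 1 (min k n)
  let start : Int :=
    if band == "high" then n - kk
    else if band == "low" then 0
    else max 0 (min (n - kk) (PySem.Int.floordiv n 2 - PySem.Int.floordiv kk 2))
  PySem.List.slice uv (some start) (some (start + kk))

-- ===== PRECONDITION & SPEC =====
def Spec_radial_uv (dct_h : Int) (dct_w : Int) (band : String) (k : Int) (exclude_dc : Bool) (out : List (Int × Int)) : Prop := out = radial_uv_alt dct_h dct_w band k exclude_dc
instance (dct_h : Int) (dct_w : Int) (band : String) (k : Int) (exclude_dc : Bool) (out : List (Int × Int)) : Decidable (Spec_radial_uv dct_h dct_w band k exclude_dc out) := by unfold Spec_radial_uv; infer_instance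

-- ===== CLAIM (what is proved, stated in full; the proofs are below) =====
def Claim_equal_radial_uv : Prop := ∀ (dct_h : Int) (dct_w : Int) (band : String) (k : Int) (exclude_dc : Bool), Dom_radial_uv dct_h dct_w band k exclude_dc → Spec_radial_uv dct_h dct_w band k exclude_dc (radial_uv dct_h dct_w band k exclude_dc)

-- ===== LEMMAS AND PROOFS =====

-- stable insertion skips a prefix it is not `before`
theorem pv_insertBy_append {α : Type} (bef : α → α → Bool) (x : α) (as bs : List α)
    (h : ∀ a ∈ as, bef x a = false) :
    PySem.List.insertBy bef x (as ++ bs) = as ++ PySem.List.insertBy bef x bs := by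
  induction as with
  | nil => rfl
  | cons a as ih =>
    simp only [List.cons_append, PySem.List.insertBy, h a (by simp),
      ih (fun a ha => h a (by simp [ha]))]
    simp

-- stable insertion lands in front of a block it is everywhere `before`
theorem pv_insertBy_front {α : Type} (bef : α → α → Bool) (x : α) (bs : List α)
    (h : ∀ b ∈ bs, bef x b = true) :
    PySem.List.insertBy bef x bs = x :: bs := by
  cases bs with
  | nil => rfl
  | cons b bs => simp [PySem.List.insertBy, h b (by simp)]

-- one stable insertion step preserves the bucket-flatten shape
theorem pv_ins_step {α : Type} (key : α → Int) (rs : List Int)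
    (hrs : rs.Pairwise (· < ·)) (x : α) (hx : key x ∈ rs) (p : List α) :
    PySem.List.insertBy (fun a b => decide (key a < key b)) x
        (rs.flatMap (fun r => p.filter (fun t => key t == r)))
      = rs.flatMap (fun r => (p ++ [x]).filter (fun t => key t == r)) := by
  induction rs with
  | nil => simp at hx
  | cons r rs ih =>
    have hlt : ∀ r' ∈ rs, r < r' := by
      intro r' hr'; exact (List.pairwise_cons.mp hrs).1 r' hr'
    have hrs' : rs.Pairwise (· < ·) := (List.pairwise_cons.mp hrs).2
    simp only [List.flatMap_cons]
    by_cases hkr : key x = r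
    · have h1 : ∀ a ∈ p.filter (fun t => key t == r), (fun a b => decide (key a < key b)) x a = false := by
        intro a ha
        have := List.of_mem_filter ha
        simp only [beq_iff_eq] at this
        simp [this, hkr]
      have h2 : ∀ b ∈ rs.flatMap (fun r => p.filter (fun t => key t == r)),
          (fun a b => decide (key a < key b)) x b = true := by
        intro b hb
        obtain ⟨r', hr', hbf⟩ := List.mem_flatMap.mp hb
        have := List.of_mem_filter hbf
        simp only [beq_iff_eq] at this
        simp [this, hkr]
        exact hlt r' hr'
      rw [pv_insertBy_append _ _ _ _ h1, pv_insertBy_front _ _ _ h2]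
      have hnot : ∀ r' ∈ rs, ¬ (key x == r') = true := by
        intro r' hr' h
        simp only [beq_iff_eq] at h
        exact absurd (hkr ▸ h ▸ hlt r' hr') (lt_irrefl _)
      have hsame : rs.flatMap (fun r => (p ++ [x]).filter (fun t => key t == r))
          = rs.flatMap (fun r => p.filter (fun t => key t == r)) := by
        apply List.flatMap_congr
        intro r' hr'
        have : (key x == r') = false := by
          simp only [beq_eq_false_iff_ne, ne_eq]
          intro h; exact absurd (hkr ▸ h ▸ hlt r' hr') (lt_irrefl _)
        simp [List.filter_append, this]
      have hfx : (p ++ [x]).filter (fun t => key t == r) = p.filter (fun t => key t == r) ++ [x] := by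
        simp [List.filter_append, hkr]
      rw [hsame, hfx]
      simp
    · have hx' : key x ∈ rs := by
        rcases List.mem_cons.mp hx with h | h
        · exact absurd h hkr
        · exact h
      have h1 : ∀ a ∈ p.filter (fun t => key t == r), (fun a b => decide (key a < key b)) x a = false := by
        intro a ha
        have hka := List.of_mem_filter ha
        simp only [beq_iff_eq] at hka
        have : r < key x := hlt _ hx'
        simp [hka]; omega
      rw [pv_insertBy_append _ _ _ _ h1, ih hrs' hx']
      have hfx : (p ++ [x]).filter (fun t => key t == r) = p.filter (fun t => key t == r) := by
        have : (key x == r) = false := by simp [hkr]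
        simp [List.filter_append, this]
      rw [hfx]

-- the insertion-sort fold keeps the bucket-flatten shape
theorem pv_foldl_flat {α : Type} (key : α → Int) (rs : List Int)
    (hrs : rs.Pairwise (· < ·)) :
    ∀ (xs q : List α), (∀ t ∈ xs, key t ∈ rs) →
      xs.foldl (fun acc x => PySem.List.insertBy (fun a b => decide (key a < key b)) x acc)
          (rs.flatMap (fun r => q.filter (fun t => key t == r)))
        = rs.flatMap (fun r => (q ++ xs).filter (fun t => key t == r)) := by
  intro xs
  induction xs with
  | nil => intro q _; simp
  | cons x xs ih =>
    intro q hmem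
    simp only [List.foldl_cons]
    rw [pv_ins_step key rs hrs x (hmem x (by simp)) q]
    have := ih (q ++ [x]) (fun t ht => hmem t (by simp [ht]))
    simpa [List.append_assoc] using this

-- Python's stable sort by an Int key IS the bucket flatten over the sorted distinct keys
theorem pv_sorted_flat {α : Type} (key : α → Int) (rs : List Int)
    (hrs : rs.Pairwise (· < ·)) (p : List α) (hmem : ∀ t ∈ p, key t ∈ rs) :
    PySem.List.sorted p key false = rs.flatMap (fun r => p.filter (fun t => key t == r)) := by
  rw [PySem.List.sorted_eq_foldl_insertBy]
  have h0 : rs.flatMap (fun r => ([] : List α).filter (fun t => key t == r)) = [] := by simp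
  have := pv_foldl_flat key rs hrs p [] hmem
  rw [h0] at this
  simpa using this

-- the empty list slices to the empty list
theorem pv_slice_nil {α : Type} (a b : Option Int) : PySem.List.slice ([] : List α) a b = [] := by
  cases a <;> cases b <;> simp [PySem.List.slice]

-- xs[n-k : n] = xs[-k:] for 1 ≤ k ≤ n = len xs
theorem pv_slice_high {α : Type} (M : List α) (kk : Int) (h1 : 1 ≤ kk)
    (h2 : kk ≤ (M.length : Int)) :
    PySem.List.slice M (some (-kk)) none
      = PySem.List.slice M (some ((M.length : Int) - kk)) (some ((M.length : Int) - kk + kk)) := by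
  have hnn : (0 : Int) ≤ (M.length : Int) - kk := by omega
  rw [PySem.List.slice_toNat M hnn (by omega), PySem.List.slice_some_none M (-kk)]
  have hc : PySem.List.clampIdx M.length (-kk) = ((M.length : Int) - kk).toNat := by
    simp only [PySem.List.clampIdx]
    split_ifs <;> omega
  rw [hc]
  have hlen : (M.drop ((M.length : Int) - kk).toNat).length
      ≤ (((M.length : Int) - kk + kk).toNat - ((M.length : Int) - kk).toNat) := by
    rw [List.length_drop]; omega
  rw [List.take_of_length_le hlen]

-- ===== VERDICT (by name: the statement is the Claim_ definition above) =====
theorem radial_uv_spec : Claim_equal_radial_uv := by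
  intro dct_h dct_w band k exclude_dc _
  unfold Spec_radial_uv radial_uv radial_uv_alt
  simp only []
  -- shared notation
  set key : Int × Int → Int := fun t => t.1 * t.1 + t.2 * t.2 with hkeydef
  set pairs : List (Int × Int) :=
    (PySem.List.pyRange 0 dct_h 1).flatMap (fun u =>
      (PySem.List.pyRange 0 dct_w 1).map (fun v => (u, v))) with hpairs
  set items : List (Int × (Int × Int)) :=
    pairs.map (fun t => (key t, t)) with hitems
  set groups : PySem.Dict Int (List (Int × Int)) :=
    (PySem.List.pyRange 0 dct_h 1).foldl (fun d u =>
      (PySem.List.pyRange 0 dct_w 1).foldl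
        (fun d v => d.modify (u * u + v * v) [] (fun l => l ++ [(u, v)])) d)
      PySem.Dict.empty with hgroups
  have hgroups_eq : groups
      = items.foldl (fun d p => d.modify p.1 [] (fun l => l ++ [p.2])) PySem.Dict.empty := by
    rw [hgroups, hitems, hpairs, List.foldl_map, List.foldl_flatMap]
    simp only [List.foldl_map]
    rfl
  have hgetD : ∀ r : Int, groups.getD r [] = pairs.filter (fun t => key t == r) := by
    intro r
    rw [hgroups_eq, PySem.Dict.getD_foldl_modify_append, PySem.Dict.getD_empty, hitems,
      List.filter_map]
    simp [Function.comp_def]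
  have hkeys : groups.keys = PySem.Set.ofList (pairs.map key) := by
    rw [hgroups_eq, PySem.Dict.keys_foldl_modify_key items (fun p => p.1) []
      (fun _ p => fun l => l ++ [p.2]) PySem.Dict.empty]
    rw [PySem.Dict.keys_empty, hitems, List.map_map]
    rfl
  set rs : List Int := PySem.List.sorted groups.keys (fun r => r) false with hrs
  have hrs_lt : rs.Pairwise (· < ·) := by
    rw [hrs, hkeys]; exact PySem.List.sorted_ofList_pairwise_lt (pairs.map key)
  have hrs_mem : ∀ t ∈ pairs, key t ∈ rs := by
    intro t ht
    rw [hrs, PySem.List.mem_sorted, hkeys, PySem.Set.mem_ofList]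
    exact List.mem_map_of_mem ht
  -- the sorted grid of A equals the flattened buckets of B
  have hkeyfun : (fun t : Int × Int => t.1 ^ 2 + t.2 ^ 2) = key := by
    funext t; rw [hkeydef]; ring
  have huv : PySem.List.sorted pairs (fun t => t.1 ^ 2 + t.2 ^ 2) false
      = rs.flatMap (fun r => groups.getD r []) := by
    rw [hkeyfun, pv_sorted_flat key rs hrs_lt pairs hrs_mem]
    exact (List.flatMap_congr (fun r _ => (hgetD r).symm))
  rw [huv]
  set L : List (Int × Int) := rs.flatMap (fun r => groups.getD r []) with hL
  -- the two exclude_dc filters coincide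
  have hfilt : (fun t : Int × Int => !(t.1 == 0 && t.2 == 0))
      = (fun t : Int × Int => !(t == ((0 : Int), (0 : Int)))) := by
    funext t; cases t; rfl
  have hlen0 : ∀ f : List (Int × Int), (PySem.List.len f = 0) = (f = []) := by
    intro f
    simp [PySem.List.len_eq, List.length_eq_zero_iff]
  simp only [hfilt, hlen0]
  set M : List (Int × Int) := (if (exclude_dc && (band == "low")) = true then
        (if L.filter (fun t => !(t == ((0 : Int), (0 : Int)))) = []
          then [((0 : Int), (0 : Int))]
          else L.filter (fun t => !(t == ((0 : Int), (0 : Int)))))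
      else L) with hMdef
  set kk : Int := max 1 (min k (PySem.List.len M)) with hkk
  -- band case split
  by_cases hlow : (band == "low") = true
  · have hlow' : band = "low" := by simpa using hlow
    have hhigh : (band == "high") = false := by rw [hlow']; rfl
    rw [if_pos hlow, hhigh]
    simp only [Bool.false_eq_true, if_false, if_pos hlow]
    rw [PySem.List.slice_zero_start, zero_add]
  · by_cases hhigh : (band == "high") = true
    · rw [if_neg hlow, if_pos hhigh, if_pos hhigh]
      rcases List.eq_nil_or_concat M with hnil | hcc
      · rw [hnil, pv_slice_nil, pv_slice_nil]
      · have hne : M ≠ [] := by rcases hcc with ⟨a, b, hM2⟩; rw [hM2]; simp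
        have hpos : 1 ≤ (M.length : Int) := by
          have := List.length_pos_iff.mpr hne; omega
        have h1 : 1 ≤ kk := by rw [hkk]; omega
        have h2 : kk ≤ (M.length : Int) := by
          rw [hkk, PySem.List.len_eq]; omega
        simp only [PySem.List.len_eq]
        exact pv_slice_high M kk h1 h2
    · rw [if_neg hlow, if_neg hhigh, if_neg hhigh, if_neg hlow]
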